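-- pv_equiv track=rewrite | github.com/wentao-hu/decentrailized_mf_with_hdp | dataprocess.py | get_user_and_item_dict
-- ===== SOURCE A (Python) =====
-- def get_user_and_item_dict(ratingList):
--     user_dict,item_dict={},{}
--     user_index,item_index=0,0
--     for i in range(len(ratingList)):
--         (user, item, rating) = ratingList[i]
--         #mark users and items with index start from 0
--         if user not in user_dict.keys():
--             user_dict[user]=user_index
--             user_index+=1
--         if item not in item_dict.keys():
--             item_dict[item]=item_index
--             item_index+=1
--     user_dict={v: k for k,v in user_dict.items()}
--     item_dict={v: k for k,v in item_dict.items()}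
--     return user_dict,item_dict
-- ===== SOURCE B (Python) =====
-- def get_user_and_item_dict(ratingList):
--     # Scan BACKWARDS, unconditionally overwriting: after the loop each value maps
--     # to its FIRST position in ratingList (earlier writes happen later and win).
--     first_user, first_item = {}, {}
--     for pos in range(len(ratingList) - 1, -1, -1):
--         (user, item, rating) = ratingList[pos]
--         first_user[user] = pos
--         first_item[item] = pos
--     # Sort by first position and number the values in that order.
--     user_dict = {n: u for n, (u, _) in enumerate(sorted(first_user.items(), key=lambda p: p[1]))}
--     item_dict = {n: it for n, (it, _) in enumerate(sorted(first_item.items(), key=lambda p: p[1]))}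
--     return user_dict, item_dict
-- ===== Notes on version B (the rewrite author's own statement) =====
-- stated objective: alternative
-- what changed: A scans forward with membership tests and two running index counters, then inverts the dicts; B scans BACKWARDS with unconditional overwrites so each value ends mapped to its first position, then sorts the (value, first-position) pairs by position and numbers them with enumerate - no membership tests, no counters, no inversion.
import Mathlib
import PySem

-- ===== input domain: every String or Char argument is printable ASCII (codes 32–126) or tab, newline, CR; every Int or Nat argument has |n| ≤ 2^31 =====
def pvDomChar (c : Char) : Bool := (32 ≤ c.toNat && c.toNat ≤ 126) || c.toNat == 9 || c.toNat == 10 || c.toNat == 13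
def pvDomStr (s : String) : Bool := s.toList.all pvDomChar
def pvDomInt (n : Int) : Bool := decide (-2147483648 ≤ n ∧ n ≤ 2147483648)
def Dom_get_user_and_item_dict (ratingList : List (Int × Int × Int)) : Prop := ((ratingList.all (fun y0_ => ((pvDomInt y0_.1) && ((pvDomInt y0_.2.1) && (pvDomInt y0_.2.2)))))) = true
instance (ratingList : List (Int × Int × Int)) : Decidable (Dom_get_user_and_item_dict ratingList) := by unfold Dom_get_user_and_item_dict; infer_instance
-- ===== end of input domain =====

-- B replaces A's forward scan with membership branches, two counters and a final dict inversion
-- by a BACKWARD scan with unconditional overwrites (leaving each value mapped to its first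
-- position) followed by a sort on those positions and an enumerate — an alternative algorithm.


-- ===== PORT A =====
-- Literal port of A: loop over range(len(ratingList)) indexing ratingList[i] (always in range, so
-- pyGetD's default is never read), two dicts with 'not in keys()' membership branches and two index
-- counters (state grouped as ((user_dict, user_index), (item_dict, item_index))), then the two
-- comprehensions {v: k for k, v in d.items()} (a dict built by inserting (v, k) in items order),
-- the two dicts returned as their items lists.
def get_user_and_item_dict (ratingList : List (Int × Int × Int)) : (List (Int × Int)) × (List (Int × Int)) :=
  let st := (PySem.List.pyRange 0 (ratingList.length : Int) 1).foldl
    (fun (st : (PySem.Dict Int Int × Int) × (PySem.Dict Int Int × Int)) i =>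
      let t := PySem.List.pyGetD ratingList i (0, 0, 0)
      (if st.1.1.contains t.1 then st.1 else (st.1.1.insert t.1 st.1.2, st.1.2 + 1),
       if st.2.1.contains t.2.1 then st.2 else (st.2.1.insert t.2.1 st.2.2, st.2.2 + 1)))
    ((PySem.Dict.empty, 0), (PySem.Dict.empty, 0))
  let user_dict := st.1.1.items.foldl (fun d p => d.insert p.2 p.1) PySem.Dict.empty
  let item_dict := st.2.1.items.foldl (fun d p => d.insert p.2 p.1) PySem.Dict.empty
  (user_dict.items, item_dict.items)

-- ===== PORT B =====
-- Literal port of B: loop over range(len-1, -1, -1) with unconditional d[key] = pos overwrites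
-- (pyGetD's default is never read: pos is always in range), then sorted(d.items(), key=snd) and the
-- comprehension {n: u for n, (u, _) in enumerate(...)} — its keys (enumerate indices) are distinct,
-- so the dict it builds IS that pair list in order (exact).
def get_user_and_item_dict_alt (ratingList : List (Int × Int × Int)) : (List (Int × Int)) × (List (Int × Int)) :=
  let st := (PySem.List.pyRange ((ratingList.length : Int) - 1) (-1) (-1)).foldl
    (fun (st : PySem.Dict Int Int × PySem.Dict Int Int) pos =>
      let t := PySem.List.pyGetD ratingList pos (0, 0, 0)
      (st.1.insert t.1 pos, st.2.insert t.2.1 pos))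
    (PySem.Dict.empty, PySem.Dict.empty)
  let users := PySem.List.sorted st.1.items (fun p => p.2) false
  let items := PySem.List.sorted st.2.items (fun p => p.2) false
  ((PySem.List.enumerate users 0).map (fun q => (q.1, q.2.1)),
   (PySem.List.enumerate items 0).map (fun q => (q.1, q.2.1)))

-- ===== PRECONDITION & SPEC =====
def Spec_get_user_and_item_dict (ratingList : List (Int × Int × Int)) (out : (List (Int × Int)) × (List (Int × Int))) : Prop := out = get_user_and_item_dict_alt ratingList
instance (ratingList : List (Int × Int × Int)) (out : (List (Int × Int)) × (List (Int × Int))) : Decidable (Spec_get_user_and_item_dict ratingList out) := by unfold Spec_get_user_and_item_dict; infer_instance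

-- ===== CLAIM (what is proved, stated in full; the proofs are below) =====
def Claim_equal_get_user_and_item_dict : Prop := ∀ (ratingList : List (Int × Int × Int)), Dom_get_user_and_item_dict ratingList → Spec_get_user_and_item_dict ratingList (get_user_and_item_dict ratingList)

-- ===== LEMMAS AND PROOFS =====

-- ---- A side: one membership-branch-plus-counter step of A's loop, for key k ----
def pvStep {α : Type} (k : α → Int) (s : PySem.Dict Int Int × Int) (x : α) :
    PySem.Dict Int Int × Int :=
  if s.1.contains (k x) then s else (s.1.insert (k x) s.2, s.2 + 1)

-- the dict A's loop has built after seeing the distinct keys `acc` (in order): key ↦ its index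
def pvIdxDict (acc : List Int) : PySem.Dict Int Int :=
  PySem.Dict.mk ((PySem.List.enumerate acc 0).map (fun p => (p.2, p.1)))

theorem pvIdxDict_contains (acc : List Int) (u : Int) :
    (pvIdxDict acc).contains u = acc.contains u := by
  rw [pvIdxDict, PySem.Dict.contains_mk]
  induction acc generalizing u with
  | nil => simp
  | cons a l ih =>
    simp only [PySem.List.enumerate_cons, List.map_cons, List.any_cons, List.contains_cons]
    have : ((PySem.List.enumerate l (0 + 1)).map (fun p => (p.2, p.1))).any (fun p => p.1 == u)
        = ((PySem.List.enumerate l 0).map (fun p => (p.2, p.1))).any (fun p => p.1 == u) := by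
      clear ih
      generalize (0 : Int) + 1 = s
      induction l generalizing s with
      | nil => simp
      | cons b m ihm => simp [PySem.List.enumerate_cons, ihm]
    rw [this, ih]
    by_cases hau : a = u
    · simp [hau]
    · rw [beq_eq_false_iff_ne.mpr hau, beq_eq_false_iff_ne.mpr (Ne.symm hau)]

theorem pvIdxDict_insert (acc : List Int) (u : Int) (h : acc.contains u = false) :
    (pvIdxDict acc).insert u (acc.length : Int) = pvIdxDict (acc ++ [u]) := by
  apply PySem.Dict.ext
  rw [PySem.Dict.items_insert_of_not_contains _ _ (by rw [pvIdxDict_contains]; exact h)]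
  simp [pvIdxDict, PySem.List.enumerate_append, PySem.List.enumerate_cons]

-- one membership-branch loop of A = appending the unseen keys, with the index dict kept in sync
theorem pvLoop {α : Type} (xs : List α) (k : α → Int) (acc : List Int) :
    xs.foldl (pvStep k) (pvIdxDict acc, (acc.length : Int))
    = (pvIdxDict ((xs.map k).foldl PySem.Set.add acc),
       (((xs.map k).foldl PySem.Set.add acc).length : Int)) := by
  induction xs generalizing acc with
  | nil => simp
  | cons x l ih =>
    simp only [List.foldl_cons, List.map_cons, pvStep, pvIdxDict_contains]
    by_cases h : k x ∈ acc
    · have hc : acc.contains (k x) = true := List.elem_eq_true_of_mem h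
      have hadd : PySem.Set.add acc (k x) = acc := by simp [PySem.Set.add, h]
      rw [if_pos hc, ih, hadd]
    · have hc : acc.contains (k x) = false := by
        cases hcc : acc.contains (k x)
        · rfl
        · exact absurd (List.mem_of_elem_eq_true hcc) h
      rw [if_neg (by simp [h]), pvIdxDict_insert acc (k x) hc]
      have hadd : PySem.Set.add acc (k x) = acc ++ [k x] := by simp [PySem.Set.add, h]
      rw [hadd]
      simpa [List.length_append] using ih (acc ++ [k x])

-- A's indexed pyRange loop is the same fold taken directly over the list
theorem pvFoldRange (rl : List (Int × Int × Int)) :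
    (PySem.List.pyRange 0 (rl.length : Int) 1).foldl
      (fun (st : (PySem.Dict Int Int × Int) × (PySem.Dict Int Int × Int)) i =>
        let t := PySem.List.pyGetD rl i (0, 0, 0)
        (if st.1.1.contains t.1 then st.1 else (st.1.1.insert t.1 st.1.2, st.1.2 + 1),
         if st.2.1.contains t.2.1 then st.2 else (st.2.1.insert t.2.1 st.2.2, st.2.2 + 1)))
      ((PySem.Dict.empty, 0), (PySem.Dict.empty, 0))
    = rl.foldl
        (fun (st : (PySem.Dict Int Int × Int) × (PySem.Dict Int Int × Int)) t =>
          (pvStep (fun t => t.1) st.1 t, pvStep (fun t => t.2.1) st.2 t))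
        ((PySem.Dict.empty, 0), (PySem.Dict.empty, 0)) :=
  PySem.List.foldl_pyRange_zero_pyGetD' rl (0, 0, 0)
    (fun (st : (PySem.Dict Int Int × Int) × (PySem.Dict Int Int × Int)) (t : Int × Int × Int) =>
      (pvStep (fun (t : Int × Int × Int) => t.1) st.1 t,
       pvStep (fun (t : Int × Int × Int) => t.2.1) st.2 t))
    ((PySem.Dict.empty, 0), (PySem.Dict.empty, 0))

theorem pvLoopNil {α : Type} (xs : List α) (k : α → Int) :
    xs.foldl (pvStep k) (PySem.Dict.empty, (0 : Int))
    = (pvIdxDict ((xs.map k).foldl PySem.Set.add []),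
       (((xs.map k).foldl PySem.Set.add []).length : Int)) := by
  have h := pvLoop xs k []
  simp only [List.length_nil, Int.natCast_zero] at h
  rw [show (pvIdxDict [] : PySem.Dict Int Int) = PySem.Dict.empty from rfl] at h
  exact h

-- the {v: k for k, v in d.items()} inversion of pvIdxDict, returned as items: exactly enumerate acc 0
theorem pvInvert (acc : List Int) :
    ((pvIdxDict acc).items.foldl (fun d p => d.insert p.2 p.1) PySem.Dict.empty).items
    = PySem.List.enumerate acc 0 := by
  have hfresh : ∀ a ∈ (pvIdxDict acc).items,
      (PySem.Dict.empty (κ := Int) (ν := Int)).contains a.2 = false := by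
    intro a _; simp [PySem.Dict.contains_empty]
  have hnd : ((pvIdxDict acc).items.map (fun p => p.2)).Nodup := by
    have : (pvIdxDict acc).items.map (fun p => p.2)
        = (PySem.List.enumerate acc 0).map (fun p => p.1) := by
      simp [pvIdxDict, List.map_map, Function.comp]
    rw [this, PySem.List.map_fst_enumerate]
    exact PySem.List.nodup_pyRange_one 0 (0 + acc.length)
  rw [PySem.Dict.items_foldl_insert_fresh _ _ _ _ hfresh hnd]
  simp [pvIdxDict, PySem.Dict.empty, List.map_map, Function.comp_def]

def pvOut (st : (PySem.Dict Int Int × Int) × (PySem.Dict Int Int × Int)) :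
    (List (Int × Int)) × (List (Int × Int)) :=
  ((st.1.1.items.foldl (fun d p => d.insert p.2 p.1) PySem.Dict.empty).items,
   (st.2.1.items.foldl (fun d p => d.insert p.2 p.1) PySem.Dict.empty).items)

-- A's whole function, per component: enumerate of the ordered distinct keys
theorem pvA_eq (rl : List (Int × Int × Int)) :
    get_user_and_item_dict rl
    = (PySem.List.enumerate ((rl.map (fun t => t.1)).foldl PySem.Set.add []) 0,
       PySem.List.enumerate ((rl.map (fun t => t.2.1)).foldl PySem.Set.add []) 0) := by
  calc get_user_and_item_dict rl
      = pvOut (rl.foldl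
                (fun (st : (PySem.Dict Int Int × Int) × (PySem.Dict Int Int × Int)) t =>
                  (pvStep (fun t => t.1) st.1 t, pvStep (fun t => t.2.1) st.2 t))
                ((PySem.Dict.empty, 0), (PySem.Dict.empty, 0))) := by
        unfold get_user_and_item_dict
        rw [pvFoldRange rl]
        rfl
    _ = pvOut ((rl.foldl (pvStep (fun t => t.1)) (PySem.Dict.empty, (0 : Int)),
                rl.foldl (pvStep (fun t => t.2.1)) (PySem.Dict.empty, (0 : Int)))) :=
        congrArg pvOut (PySem.List.foldl_prod_mk _ _ rl _ _)
    _ = _ := by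
        rw [pvLoopNil rl (fun t => t.1), pvLoopNil rl (fun t => t.2.1)]
        simp only [pvOut]
        rw [pvInvert, pvInvert]

-- ---- B side ----

-- B's backward fold over one key function, started at position s for list l
def pvDfold {α : Type} (k : α → Int) (l : List α) (s : Int) : PySem.Dict Int Int :=
  ((PySem.List.enumerate l s).reverse).foldl (fun d p => d.insert (k p.2) p.1) PySem.Dict.empty

theorem pvDfold_cons {α : Type} (k : α → Int) (x : α) (xs : List α) (s : Int) :
    pvDfold k (x :: xs) s = (pvDfold k xs (s + 1)).insert (k x) s := by
  simp [pvDfold, PySem.List.enumerate_cons, List.foldl_append]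

-- first-occurrence index of u in ks, counting from s
def pvFi (ks : List Int) (s : Int) (u : Int) : Option Int :=
  match ks with
  | [] => none
  | a :: t => if a = u then some s else pvFi t (s + 1) u

theorem pvDfold_get? {α : Type} (k : α → Int) (l : List α) (s : Int) (u : Int) :
    (pvDfold k l s).get? u = pvFi (l.map k) s u := by
  induction l generalizing s with
  | nil => simp [pvDfold, PySem.List.enumerate_nil, PySem.Dict.get?_empty, pvFi]
  | cons x xs ih =>
    rw [pvDfold_cons, PySem.Dict.get?_insert]
    simp only [List.map_cons, pvFi]
    by_cases h : u = k x
    · simp [h]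
    · rw [if_neg h, if_neg (fun he => h he.symm), ih]

theorem pvDfold_nodup_keys {α : Type} (k : α → Int) (l : List α) (s : Int) :
    (pvDfold k l s).keys.Nodup :=
  PySem.Dict.nodup_keys_foldl_insert_key _ _ _ _ PySem.Dict.nodup_keys_empty

theorem pvFi_cons (a : Int) (t : List Int) (s u : Int) :
    pvFi (a :: t) s u = if a = u then some s else pvFi t (s + 1) u := rfl

theorem pvDfold_mem_items {α : Type} (k : α → Int) (l : List α) (s u i : Int) :
    (u, i) ∈ (pvDfold k l s).items ↔ pvFi (l.map k) s u = some i := by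
  rw [← PySem.Dict.get?_eq_some_iff_mem_items _ u i (pvDfold_nodup_keys k l s), pvDfold_get?]

-- the first-occurrence (value, position) pairs of ks from position s, given already-seen acc
def pvFP (acc : List Int) (s : Int) (ks : List Int) : List (Int × Int) :=
  match ks with
  | [] => []
  | a :: t => if a ∈ acc then pvFP acc (s + 1) t
              else (a, s) :: pvFP (PySem.Set.add acc a) (s + 1) t

theorem pvFP_mem (ks : List Int) (acc : List Int) (s u i : Int) :
    (u, i) ∈ pvFP acc s ks ↔ u ∉ acc ∧ pvFi ks s u = some i := by
  induction ks generalizing acc s with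
  | nil => simp [pvFP, pvFi]
  | cons a t ih =>
    by_cases ha : a ∈ acc
    · rw [pvFP, if_pos ha, ih, pvFi_cons]
      constructor
      · rintro ⟨hnm, hfi⟩
        exact ⟨hnm, by rw [if_neg (fun he : a = u => hnm (he ▸ ha))]; exact hfi⟩
      · rintro ⟨hnm, hfi⟩
        rw [if_neg (fun he : a = u => hnm (he ▸ ha))] at hfi
        exact ⟨hnm, hfi⟩
    · have hadd : PySem.Set.add acc a = acc ++ [a] := by simp [PySem.Set.add, ha]
      rw [pvFP, if_neg ha, pvFi_cons]
      constructor
      · intro h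
        rcases List.mem_cons.mp h with he | hm
        · rw [Prod.ext_iff] at he
          obtain ⟨h1, h2⟩ := he
          subst h1; subst h2
          exact ⟨ha, by rw [if_pos rfl]⟩
        · rw [ih, hadd] at hm
          obtain ⟨hnm, hfi⟩ := hm
          have hua : ¬ a = u := fun he => hnm (by simp [he.symm])
          exact ⟨fun hc => hnm (by simp [hc]), by rw [if_neg hua]; exact hfi⟩
      · rintro ⟨hnm, hfi⟩
        by_cases hu : a = u
        · subst hu
          rw [if_pos rfl] at hfi
          have hs : s = i := Option.some.inj hfi
          exact List.mem_cons.mpr (Or.inl (by rw [← hs]))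
        · rw [if_neg hu] at hfi
          refine List.mem_cons.mpr (Or.inr ?_)
          rw [ih, hadd]
          refine ⟨?_, hfi⟩
          intro hc
          rcases List.mem_append.mp hc with h1 | h2
          · exact hnm h1
          · exact hu (List.mem_singleton.mp h2).symm

theorem pvFP_snd_ge (ks : List Int) (acc : List Int) (s : Int) :
    ∀ p ∈ pvFP acc s ks, s ≤ p.2 := by
  induction ks generalizing acc s with
  | nil => simp [pvFP]
  | cons a t ih =>
    intro p hp
    by_cases ha : a ∈ acc
    · rw [pvFP, if_pos ha] at hp
      have := ih acc (s + 1) p hp; omega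
    · rw [pvFP, if_neg ha] at hp
      rcases List.mem_cons.mp hp with he | hm
      · rw [he]
      · have := ih _ (s + 1) p hm; omega

theorem pvFP_pairwise (ks : List Int) (acc : List Int) (s : Int) :
    (pvFP acc s ks).Pairwise (fun p q => p.2 < q.2) := by
  induction ks generalizing acc s with
  | nil => simp [pvFP]
  | cons a t ih =>
    by_cases ha : a ∈ acc
    · rw [pvFP, if_pos ha]; exact ih acc (s + 1)
    · rw [pvFP, if_neg ha]
      refine List.Pairwise.cons (fun q hq => ?_) (ih _ (s + 1))
      have := pvFP_snd_ge t _ (s + 1) q hq; omega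

theorem pvFP_fst (ks : List Int) (acc : List Int) (s : Int) :
    ks.foldl PySem.Set.add acc = acc ++ (pvFP acc s ks).map Prod.fst := by
  induction ks generalizing acc s with
  | nil => simp [pvFP]
  | cons a t ih =>
    by_cases ha : a ∈ acc
    · have hadd : PySem.Set.add acc a = acc := by simp [PySem.Set.add, ha]
      rw [List.foldl_cons, hadd, pvFP, if_pos ha, ih acc (s + 1)]
    · have hadd : PySem.Set.add acc a = acc ++ [a] := by simp [PySem.Set.add, ha]
      rw [List.foldl_cons, pvFP, if_neg ha, ih (PySem.Set.add acc a) (s + 1)]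
      simp [hadd]

theorem pvFP_fst_nodup (ks : List Int) (acc : List Int) (s : Int) :
    ((pvFP acc s ks).map (fun p => p.1)).Nodup
      ∧ ∀ u ∈ (pvFP acc s ks).map (fun p => p.1), u ∉ acc := by
  induction ks generalizing acc s with
  | nil => simp [pvFP]
  | cons a t ih =>
    by_cases ha : a ∈ acc
    · rw [pvFP, if_pos ha]; exact ih acc (s + 1)
    · have hadd : PySem.Set.add acc a = acc ++ [a] := by simp [PySem.Set.add, ha]
      rw [pvFP, if_neg ha, hadd]
      obtain ⟨hnd, hnm⟩ := ih (acc ++ [a]) (s + 1)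
      simp only [List.map_cons]
      refine ⟨List.Nodup.cons (fun hm => hnm a hm (by simp)) hnd, ?_⟩
      intro u hu
      rcases List.mem_cons.mp hu with he | hm
      · rw [he]; exact ha
      · exact fun hacc => hnm u hm (by simp [hacc])

theorem pvFP_perm_items {α : Type} (k : α → Int) (l : List α) (s : Int) :
    (pvFP [] s (l.map k)).Perm (pvDfold k l s).items := by
  have h1 : (pvFP [] s (l.map k)).Nodup :=
    List.Nodup.of_map _ (pvFP_fst_nodup (l.map k) [] s).1
  have h2 : (pvDfold k l s).items.Nodup :=
    List.Nodup.of_map _ (pvDfold_nodup_keys k l s)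
  rw [List.perm_ext_iff_of_nodup h1 h2]
  rintro ⟨u, i⟩
  rw [pvFP_mem, pvDfold_mem_items]
  simp

theorem pvSorted_items {α : Type} (k : α → Int) (l : List α) (s : Int) :
    PySem.List.sorted (pvDfold k l s).items (fun p => p.2) false = pvFP [] s (l.map k) :=
  PySem.List.sorted_eq_of_perm_of_pairwise_lt _ _ (fun p => p.2)
    (pvFP_perm_items k l s) (pvFP_pairwise (l.map k) [] s)

theorem pvEnumerate_map {α β : Type} (f : α → β) (l : List α) (s : Int) :
    (PySem.List.enumerate l s).map (fun q => (q.1, f q.2))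
      = PySem.List.enumerate (l.map f) s := by
  induction l generalizing s with
  | nil => simp
  | cons x xs ih => simp [PySem.List.enumerate_cons, ih]

-- B's countdown pyRange fold = the fold over the reversed enumeration of the list
theorem pvBfoldRange (rl : List (Int × Int × Int)) :
    (PySem.List.pyRange ((rl.length : Int) - 1) (-1) (-1)).foldl
      (fun (st : PySem.Dict Int Int × PySem.Dict Int Int) pos =>
        let t := PySem.List.pyGetD rl pos (0, 0, 0)
        (st.1.insert t.1 pos, st.2.insert t.2.1 pos))
      (PySem.Dict.empty, PySem.Dict.empty)
    = ((PySem.List.enumerate rl 0).reverse).foldl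
        (fun (st : PySem.Dict Int Int × PySem.Dict Int Int) p =>
          (st.1.insert p.2.1 p.1, st.2.insert p.2.2.1 p.1))
        (PySem.Dict.empty, PySem.Dict.empty) := by
  have hr : PySem.List.pyRange ((rl.length : Int) - 1) (-1) (-1)
      = (PySem.List.pyRange 0 (rl.length : Int) 1).reverse := by
    rw [PySem.List.pyRange_neg_one_eq_reverse]
    norm_num
  rw [hr, PySem.List.enumerate_eq_map_pyRange rl ((0 : Int), (0 : Int), (0 : Int)),
    PySem.List.len_eq, ← List.map_reverse, List.foldl_map]

-- B's whole function, per component: same enumerate of the ordered distinct keys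
theorem pvB_eq (rl : List (Int × Int × Int)) :
    get_user_and_item_dict_alt rl
    = (PySem.List.enumerate ((rl.map (fun t => t.1)).foldl PySem.Set.add []) 0,
       PySem.List.enumerate ((rl.map (fun t => t.2.1)).foldl PySem.Set.add []) 0) := by
  unfold get_user_and_item_dict_alt
  rw [pvBfoldRange rl]
  have hsplit : ((PySem.List.enumerate rl 0).reverse).foldl
      (fun (st : PySem.Dict Int Int × PySem.Dict Int Int) p =>
        (st.1.insert p.2.1 p.1, st.2.insert p.2.2.1 p.1))
      (PySem.Dict.empty, PySem.Dict.empty)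
      = (pvDfold (fun t => t.1) rl 0, pvDfold (fun t => t.2.1) rl 0) :=
    PySem.List.foldl_prod_mk
      (fun (d : PySem.Dict Int Int) (p : Int × Int × Int × Int) => d.insert p.2.1 p.1)
      (fun (d : PySem.Dict Int Int) (p : Int × Int × Int × Int) => d.insert p.2.2.1 p.1)
      ((PySem.List.enumerate rl 0).reverse) PySem.Dict.empty PySem.Dict.empty
  rw [hsplit]
  simp only [pvSorted_items, pvEnumerate_map]
  have h1 := pvFP_fst (rl.map (fun t => t.1)) [] 0
  have h2 := pvFP_fst (rl.map (fun t => t.2.1)) [] 0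
  simp only [List.nil_append] at h1 h2
  rw [← h1, ← h2]

-- ===== VERDICT (by name: the statement is the Claim_ definition above) =====
theorem get_user_and_item_dict_spec : Claim_equal_get_user_and_item_dict := by
  intro ratingList _
  unfold Spec_get_user_and_item_dict
  rw [pvA_eq, pvB_eq]
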